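-- pv_equiv track=rewrite | github.com/BASILJACOB123/codejam_codes | aes_encryption.py | gfunction
-- ===== SOURCE A (Python) =====
-- sbox=[[['6','3'],['7','C'],['7','7'],['7','B'],['F','2'],['6','B'],['6','F'],['C','5'],['3','0'],['0','1'],['6','7'],['2','B'],['F','E'],['D','7'],['A','B'],['7','6']],
-- [['C','A'],['8','2'],['C','9'],['7','D'],['F','A'],['5','9'],['4','7'],['F','0'],['A','D'],['D','4'],['A','2'],['A','F'],['9','C'],['A','4'],['7','2'],['C','0']],
-- [['B','7'],['F','D'],['9','3'],['2','6'],['3','6'],['3','F'],['F','7'],['C','C'],['3','4'],['A','5'],['E','5'],['F','1'],['7','1'],['D','8'],['3','1'],['1','5']],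
-- [['0','4'],['C','7'],['2','3'],['C','3'],['1','8'],['9','6'],['0','5'],['9','A'],['0','7'],['1','2'],['8','0'],['E','2'],['E','B'],['2','7'],['B','2'],['7','5']],
-- [['0','9'],['8','3'],['2','C'],['1','A'],['1','B'],['6','E'],['5','A'],['A','0'],['5','2'],['3','B'],['D','6'],['B','3'],['2','9'],['E','3'],['2','F'],['8','4']],
-- [['5','3'],['D','1'],['0','0'],['E','D'],['2','0'],['F','C'],['B','1'],['5','B'],['6','A'],['C','B'],['B','E'],['3','9'],['4','A'],['4','C'],['5','8'],['C','F']],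
-- [['D','0'],['E','F'],['A','A'],['F','B'],['4','3'],['4','D'],['3','3'],['8','5'],['4','5'],['F','9'],['0','2'],['7','F'],['5','0'],['3','C'],['9','F'],['A','8']],
-- [['5','1'],['A','3'],['4','0'],['8','F'],['9','2'],['9','D'],['3','8'],['F','5'],['B','C'],['B','6'],['D','A'],['2','1'],['1','0'],['F','F'],['F','3'],['D','2']],
-- [['C','D'],['0','C'],['1','3'],['E','C'],['5','F'],['9','7'],['4','4'],['1','7'],['C','4'],['A','7'],['7','E'],['3','D'],['6','4'],['5','D'],['1','9'],['7','3']],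
-- [['6','0'],['8','1'],['4','F'],['D','C'],['2','2'],['2','A'],['9','0'],['8','8'],['4','6'],['E','E'],['B','8'],['1','4'],['D','E'],['5','E'],['0','B'],['D','B']],
-- [['E','0'],['3','2'],['3','A'],['0','A'],['4','9'],['0','6'],['2','4'],['5','C'],['C','2'],['D','3'],['A','C'],['6','2'],['9','1'],['9','5'],['E','4'],['7','9']],
-- [['E','7'],['C','8'],['3','7'],['6','D'],['8','D'],['D','5'],['4','E'],['A','9'],['6','C'],['5','6'],['F','4'],['E','A'],['6','5'],['7','A'],['A','E'],['0','8']],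
-- [['B','A'],['7','8'],['2','5'],['2','E'],['1','C'],['A','6'],['B','4'],['C','6'],['E','8'],['D','D'],['7','4'],['1','F'],['4','B'],['B','D'],['8','B'],['8','A']],
-- [['7','0'],['3','E'],['B','5'],['6','6'],['4','8'],['0','3'],['F','6'],['0','E'],['6','1'],['3','5'],['5','7'],['B','9'],['8','6'],['C','1'],['1','D'],['9','E']],
-- [['E','1'],['F','8'],['9','8'],['1','1'],['6','9'],['D','9'],['8','E'],['9','4'],['9','B'],['1','E'],['8','7'],['E','9'],['C','E'],['5','5'],['2','8'],['D','F']],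
-- [['8','C'],['A','1'],['8','9'],['0','D'],['B','F'],['E','6'],['4','2'],['6','8'],['4','1'],['9','9'],['2','D'],['0','F'],['B','0'],['5','4'],['B','B'],['1','6']]]
--
-- dic={'0':0,'1':1,'2':2,'3':3,'4':4,'5':5,'6':6,'7':7,'8':8,'9':9,'A':10,'B':11,'C':12,'D':13,'E':14,'F':15}
--
-- hexx={'0':'0000','1':'0001','2':'0010','3':'0011','4':'0100','5':'0101','6':'0110','7':'0111','8':'1000','9':'1001','A':'1010','B':'1011','C':'1100','D':'1101','E':'1110','F':'1111'}
--
-- rcon=[['0','0','0','0','0','0','0','1'],['0','0','0','0','0','0','1','0'],['0','0','0','0','0','1','0','0'],['0','0','0','0','1','0','0','0'],['0','0','0','1','0','0','0','0'],['0','0','1','0','0','0','0','0'],['0','1','0','0','0','0','0','0'],['1','0','0','0','0','0','0','0'],['0','0','0','1','1','0','1','1'],['0','0','1','1','0','1','1','0']]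
--
-- def bin2hex(val):
--     var1=""
--     var2=""
--     var1=str(val[0])+str(val[1])+str(val[2])+str(val[3])
--     for key,value in hexx.items():
--         if var1==value:
--             var2+=key
--     return var2
--
-- def leftshift(val):
--     temp=val[0]
--     for i in range(1,4):
--         val[i-1]=val[i]
--     val[3]=temp
--
-- def gfunction(val,n):
--     #Step a
--     leftshift(val)
--     x=[]
--     #Step b
--     for i in range(0,4):
--         xx=[]
--         xx.append(sbox[dic[val[i][0]]][dic[val[i][1]]][0])
--         xx.append(sbox[dic[val[i][0]]][dic[val[i][1]]][1])
--         x.append(xx)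
--     #Step c
--     var=[]
--     temp3=[]
--     temp1=rcon[n-1]
--     temp2=hexx[x[0][0]]+hexx[x[0][1]]
--     for i in range(0,8):
--         temp3.append(str(int(temp1[i])^int(temp2[i])))
--     x[0][0]=bin2hex(temp3[0:4])
--     x[0][1]=bin2hex(temp3[4:8])
--     return x
-- ===== SOURCE B (Python) =====
-- # B: integer arithmetic on a flat 256-entry S-box instead of nested char-pair tables
-- # and bit-string XOR; mutates val in place (same rotation of val[0..3]) like A.
-- HEX = "0123456789ABCDEF"
--
-- SBOX = [
-- 0x63,0x7C,0x77,0x7B,0xF2,0x6B,0x6F,0xC5,0x30,0x01,0x67,0x2B,0xFE,0xD7,0xAB,0x76,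
-- 0xCA,0x82,0xC9,0x7D,0xFA,0x59,0x47,0xF0,0xAD,0xD4,0xA2,0xAF,0x9C,0xA4,0x72,0xC0,
-- 0xB7,0xFD,0x93,0x26,0x36,0x3F,0xF7,0xCC,0x34,0xA5,0xE5,0xF1,0x71,0xD8,0x31,0x15,
-- 0x04,0xC7,0x23,0xC3,0x18,0x96,0x05,0x9A,0x07,0x12,0x80,0xE2,0xEB,0x27,0xB2,0x75,
-- 0x09,0x83,0x2C,0x1A,0x1B,0x6E,0x5A,0xA0,0x52,0x3B,0xD6,0xB3,0x29,0xE3,0x2F,0x84,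
-- 0x53,0xD1,0x00,0xED,0x20,0xFC,0xB1,0x5B,0x6A,0xCB,0xBE,0x39,0x4A,0x4C,0x58,0xCF,
-- 0xD0,0xEF,0xAA,0xFB,0x43,0x4D,0x33,0x85,0x45,0xF9,0x02,0x7F,0x50,0x3C,0x9F,0xA8,
-- 0x51,0xA3,0x40,0x8F,0x92,0x9D,0x38,0xF5,0xBC,0xB6,0xDA,0x21,0x10,0xFF,0xF3,0xD2,
-- 0xCD,0x0C,0x13,0xEC,0x5F,0x97,0x44,0x17,0xC4,0xA7,0x7E,0x3D,0x64,0x5D,0x19,0x73,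
-- 0x60,0x81,0x4F,0xDC,0x22,0x2A,0x90,0x88,0x46,0xEE,0xB8,0x14,0xDE,0x5E,0x0B,0xDB,
-- 0xE0,0x32,0x3A,0x0A,0x49,0x06,0x24,0x5C,0xC2,0xD3,0xAC,0x62,0x91,0x95,0xE4,0x79,
-- 0xE7,0xC8,0x37,0x6D,0x8D,0xD5,0x4E,0xA9,0x6C,0x56,0xF4,0xEA,0x65,0x7A,0xAE,0x08,
-- 0xBA,0x78,0x25,0x2E,0x1C,0xA6,0xB4,0xC6,0xE8,0xDD,0x74,0x1F,0x4B,0xBD,0x8B,0x8A,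
-- 0x70,0x3E,0xB5,0x66,0x48,0x03,0xF6,0x0E,0x61,0x35,0x57,0xB9,0x86,0xC1,0x1D,0x9E,
-- 0xE1,0xF8,0x98,0x11,0x69,0xD9,0x8E,0x94,0x9B,0x1E,0x87,0xE9,0xCE,0x55,0x28,0xDF,
-- 0x8C,0xA1,0x89,0x0D,0xBF,0xE6,0x42,0x68,0x41,0x99,0x2D,0x0F,0xB0,0x54,0xBB,0x16]
--
-- RCON = [0x01,0x02,0x04,0x08,0x10,0x20,0x40,0x80,0x1B,0x36]
--
-- def gfunction(val, n):
--     # step a: rotate the word left by one byte (in place, like A)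
--     val[0], val[1], val[2], val[3] = val[1], val[2], val[3], val[0]
--     # step b: substitute each byte through the flat integer S-box
--     bs = [SBOX[HEX.index(val[i][0]) * 16 + HEX.index(val[i][1])] for i in range(4)]
--     # step c: XOR the first byte with the round constant, as integers
--     bs[0] ^= RCON[n - 1]
--     return [[HEX[b // 16], HEX[b % 16]] for b in bs]
-- ===== Notes on version B (the rewrite author's own statement) =====
-- stated objective: alternative
-- what changed: B replaces A's nested char-pair S-box table, bit-string expansion dicts and 8-step bit-string XOR loop (with a 16-entry dict scan per nibble) by a flat 256-entry integer S-box, a single integer XOR with an integer round-constant table, and divmod-based hex formatting.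
import Mathlib
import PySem

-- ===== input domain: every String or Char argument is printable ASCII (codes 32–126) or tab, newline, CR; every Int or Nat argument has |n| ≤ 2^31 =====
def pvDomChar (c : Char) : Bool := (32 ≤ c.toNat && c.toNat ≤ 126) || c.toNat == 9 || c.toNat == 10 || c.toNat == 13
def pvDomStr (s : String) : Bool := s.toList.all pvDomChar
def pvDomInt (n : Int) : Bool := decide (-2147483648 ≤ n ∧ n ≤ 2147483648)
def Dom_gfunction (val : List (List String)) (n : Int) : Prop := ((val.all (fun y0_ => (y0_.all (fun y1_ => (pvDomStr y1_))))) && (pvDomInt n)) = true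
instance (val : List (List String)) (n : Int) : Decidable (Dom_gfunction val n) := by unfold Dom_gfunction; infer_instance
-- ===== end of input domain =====

-- B replaces A's nested char-pair S-box tables and bit-string XOR with a flat 256-entry
-- integer S-box and an integer XOR (objective: alternative). Both Pythons mutate the first
-- four entries of `val` in place identically; the equivalence proved here is about the
-- return value.

-- ===== PORT A =====
def pvSbox : List (List (List String)) :=
[[["6","3"],["7","C"],["7","7"],["7","B"],["F","2"],["6","B"],["6","F"],["C","5"],["3","0"],["0","1"],["6","7"],["2","B"],["F","E"],["D","7"],["A","B"],["7","6"]],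
[["C","A"],["8","2"],["C","9"],["7","D"],["F","A"],["5","9"],["4","7"],["F","0"],["A","D"],["D","4"],["A","2"],["A","F"],["9","C"],["A","4"],["7","2"],["C","0"]],
[["B","7"],["F","D"],["9","3"],["2","6"],["3","6"],["3","F"],["F","7"],["C","C"],["3","4"],["A","5"],["E","5"],["F","1"],["7","1"],["D","8"],["3","1"],["1","5"]],
[["0","4"],["C","7"],["2","3"],["C","3"],["1","8"],["9","6"],["0","5"],["9","A"],["0","7"],["1","2"],["8","0"],["E","2"],["E","B"],["2","7"],["B","2"],["7","5"]],
[["0","9"],["8","3"],["2","C"],["1","A"],["1","B"],["6","E"],["5","A"],["A","0"],["5","2"],["3","B"],["D","6"],["B","3"],["2","9"],["E","3"],["2","F"],["8","4"]],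
[["5","3"],["D","1"],["0","0"],["E","D"],["2","0"],["F","C"],["B","1"],["5","B"],["6","A"],["C","B"],["B","E"],["3","9"],["4","A"],["4","C"],["5","8"],["C","F"]],
[["D","0"],["E","F"],["A","A"],["F","B"],["4","3"],["4","D"],["3","3"],["8","5"],["4","5"],["F","9"],["0","2"],["7","F"],["5","0"],["3","C"],["9","F"],["A","8"]],
[["5","1"],["A","3"],["4","0"],["8","F"],["9","2"],["9","D"],["3","8"],["F","5"],["B","C"],["B","6"],["D","A"],["2","1"],["1","0"],["F","F"],["F","3"],["D","2"]],
[["C","D"],["0","C"],["1","3"],["E","C"],["5","F"],["9","7"],["4","4"],["1","7"],["C","4"],["A","7"],["7","E"],["3","D"],["6","4"],["5","D"],["1","9"],["7","3"]],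
[["6","0"],["8","1"],["4","F"],["D","C"],["2","2"],["2","A"],["9","0"],["8","8"],["4","6"],["E","E"],["B","8"],["1","4"],["D","E"],["5","E"],["0","B"],["D","B"]],
[["E","0"],["3","2"],["3","A"],["0","A"],["4","9"],["0","6"],["2","4"],["5","C"],["C","2"],["D","3"],["A","C"],["6","2"],["9","1"],["9","5"],["E","4"],["7","9"]],
[["E","7"],["C","8"],["3","7"],["6","D"],["8","D"],["D","5"],["4","E"],["A","9"],["6","C"],["5","6"],["F","4"],["E","A"],["6","5"],["7","A"],["A","E"],["0","8"]],
[["B","A"],["7","8"],["2","5"],["2","E"],["1","C"],["A","6"],["B","4"],["C","6"],["E","8"],["D","D"],["7","4"],["1","F"],["4","B"],["B","D"],["8","B"],["8","A"]],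
[["7","0"],["3","E"],["B","5"],["6","6"],["4","8"],["0","3"],["F","6"],["0","E"],["6","1"],["3","5"],["5","7"],["B","9"],["8","6"],["C","1"],["1","D"],["9","E"]],
[["E","1"],["F","8"],["9","8"],["1","1"],["6","9"],["D","9"],["8","E"],["9","4"],["9","B"],["1","E"],["8","7"],["E","9"],["C","E"],["5","5"],["2","8"],["D","F"]],
[["8","C"],["A","1"],["8","9"],["0","D"],["B","F"],["E","6"],["4","2"],["6","8"],["4","1"],["9","9"],["2","D"],["0","F"],["B","0"],["5","4"],["B","B"],["1","6"]]]

def pvDic : PySem.Dict (List Char) Int := PySem.Dict.ofList [(['0'],(0:Int)),(['1'],(1:Int)),(['2'],(2:Int)),(['3'],(3:Int)),(['4'],(4:Int)),(['5'],(5:Int)),(['6'],(6:Int)),(['7'],(7:Int)),(['8'],(8:Int)),(['9'],(9:Int)),(['A'],(10:Int)),(['B'],(11:Int)),(['C'],(12:Int)),(['D'],(13:Int)),(['E'],(14:Int)),(['F'],(15:Int))]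

def pvHexx : PySem.Dict (List Char) (List Char) := PySem.Dict.ofList [(['0'],['0','0','0','0']),(['1'],['0','0','0','1']),(['2'],['0','0','1','0']),(['3'],['0','0','1','1']),(['4'],['0','1','0','0']),(['5'],['0','1','0','1']),(['6'],['0','1','1','0']),(['7'],['0','1','1','1']),(['8'],['1','0','0','0']),(['9'],['1','0','0','1']),(['A'],['1','0','1','0']),(['B'],['1','0','1','1']),(['C'],['1','1','0','0']),(['D'],['1','1','0','1']),(['E'],['1','1','1','0']),(['F'],['1','1','1','1'])]

def pvRcon : List (List String) :=
[["0","0","0","0","0","0","0","1"],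
["0","0","0","0","0","0","1","0"],
["0","0","0","0","0","1","0","0"],
["0","0","0","0","1","0","0","0"],
["0","0","0","1","0","0","0","0"],
["0","0","1","0","0","0","0","0"],
["0","1","0","0","0","0","0","0"],
["1","0","0","0","0","0","0","0"],
["0","0","0","1","1","0","1","1"],
["0","0","1","1","0","1","1","0"]]

def pvSboxB : List Int :=
[99,124,119,123,242,107,111,197,48,1,103,43,254,215,171,118,202,130,201,125,250,89,71,240,173,212,162,175,156,164,114,192,183,253,147,38,54,63,247,204,52,165,229,241,113,216,49,21,4,199,35,195,24,150,5,154,7,18,128,226,235,39,178,117,9,131,44,26,27,110,90,160,82,59,214,179,41,227,47,132,83,209,0,237,32,252,177,91,106,203,190,57,74,76,88,207,208,239,170,251,67,77,51,133,69,249,2,127,80,60,159,168,81,163,64,143,146,157,56,245,188,182,218,33,16,255,243,210,205,12,19,236,95,151,68,23,196,167,126,61,100,93,25,115,96,129,79,220,34,42,144,136,70,238,184,20,222,94,11,219,224,50,58,10,73,6,36,92,194,211,172,98,145,149,228,121,231,200,55,109,141,213,78,169,108,86,244,234,101,122,174,8,186,120,37,46,28,166,180,198,232,221,116,31,75,189,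139,138,112,62,181,102,72,3,246,14,97,53,87,185,134,193,29,158,225,248,152,17,105,217,142,148,155,30,135,233,206,85,40,223,140,161,137,13,191,230,66,104,65,153,45,15,176,84,187,22]

def pvRconB : List Int := [1,2,4,8,16,32,64,128,27,54]


-- Python A's bin2hex: concatenate the four bit-strings, scan the hexx dict for the matching
-- key (strings handled as their character lists, PySem's string representation)
def pvBin2hex (v : List (List Char)) : List Char :=
  let var1 : List Char :=
    (PySem.List.pyGet? v 0).getD [] ++ (PySem.List.pyGet? v 1).getD []
    ++ (PySem.List.pyGet? v 2).getD [] ++ (PySem.List.pyGet? v 3).getD []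
  pvHexx.items.foldl (fun var2 kv => if var1 = kv.2 then var2 ++ kv.1 else var2) []

-- Python A's leftshift: the in-place rotation of val[0..3] (IndexError when len < 4 is outside Pre_)
def pvLeftshift (val : List (List String)) : List (List String)  :=
  match val with
  | a :: b :: c :: d :: rest => b :: c :: d :: a :: rest
  | other => other

-- step b body: sbox[dic[h]][dic[l]] copied into a fresh two-entry list
def pvASub (h l : String) : List String :=
  let pair := (PySem.List.pyGet? ((PySem.List.pyGet? pvSbox ((pvDic.get? h.toList).getD 0)).getD [])
                ((pvDic.get? l.toList).getD 0)).getD []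
  [(PySem.List.pyGet? pair 0).getD "", (PySem.List.pyGet? pair 1).getD ""]

-- step c: bit-string XOR of x[0] with the rcon row, then bin2hex on each 4-bit half
def pvAXor (x0 : List String) (temp1 : List String) : List String :=
  let temp2 : List Char :=
    (pvHexx.get? ((PySem.List.pyGet? x0 0).getD "").toList).getD []
    ++ (pvHexx.get? ((PySem.List.pyGet? x0 1).getD "").toList).getD []
  let temp3 : List (List Char) := (List.range 8).map (fun i =>
    PySem.Int.toChars (PySem.Int.bxor
      ((PySem.Int.ofChars? ((PySem.List.pyGet? temp1 (i : Int)).getD "").toList).getD 0)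
      ((PySem.Int.ofChars? (((PySem.List.pyGet? temp2 (i : Int)).map (fun c => [c])).getD [])).getD 0)))
  [String.ofList (pvBin2hex (PySem.List.slice temp3 (some 0) (some 4))),
   String.ofList (pvBin2hex (PySem.List.slice temp3 (some 4) (some 8)))]

def gfunction (val : List (List String)) (n : Int) : List (List String) :=
  let val2 := pvLeftshift val
  let x := (List.range 4).map (fun i =>
    let row := (PySem.List.pyGet? val2 (i : Int)).getD []
    pvASub ((PySem.List.pyGet? row 0).getD "") ((PySem.List.pyGet? row 1).getD ""))
  let temp1 := (PySem.List.pyGet? pvRcon (n - 1)).getD []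
  -- x[0][0] = ...; x[0][1] = ... : replace the first (two-entry) pair of x
  PySem.List.pySetD x 0 (pvAXor (PySem.List.pyGetD x 0 []) temp1)

-- ===== PORT B =====
-- B's HEX string, kept as its character list (PySem's string representation)
def pvHexChars : List Char := "0123456789ABCDEF".toList

-- B: S-box lookup as one flat integer table indexed by 16*HEX.index(hi) + HEX.index(lo)
def pvBByte (h l : String) : Int :=
  (PySem.List.pyGet? pvSboxB
    (PySem.Chars.find pvHexChars h.toList * 16 + PySem.Chars.find pvHexChars l.toList)).getD 0

-- B: format a byte back into its two uppercase hex characters (HEX[b // 16], HEX[b % 16])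
def pvBFmt (b : Int) : List String :=
  [((PySem.List.pyGet? pvHexChars (PySem.Int.floordiv b 16)).map (fun c => String.ofList [c])).getD "",
   ((PySem.List.pyGet? pvHexChars (PySem.Int.mod b 16)).map (fun c => String.ofList [c])).getD ""]

def gfunction_alt (val : List (List String)) (n : Int) : List (List String) :=
  let v := match val with
    | a :: b :: c :: d :: rest => b :: c :: d :: a :: rest
    | other => other
  let bs := (List.range 4).map (fun i =>
    let row := (PySem.List.pyGet? v (i : Int)).getD []
    pvBByte ((PySem.List.pyGet? row 0).getD "") ((PySem.List.pyGet? row 1).getD ""))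
  -- bs[0] ^= RCON[n - 1]
  let bs2 := PySem.List.pySetD bs 0
    (PySem.Int.bxor (PySem.List.pyGetD bs 0 0) ((PySem.List.pyGet? pvRconB (n - 1)).getD 0))
  bs2.map pvBFmt

-- ===== PRECONDITION & SPEC =====
def pvHexL : List String := ["0","1","2","3","4","5","6","7","8","9","A","B","C","D","E","F"]

-- Pre_ admits exactly the inputs where Python A returns: at least 4 rows, the first four
-- rows each having two leading single uppercase-hex-character entries (else dic raises
-- KeyError / IndexError), and -9 ≤ n ≤ 10 (else rcon[n-1] raises IndexError).
def Pre_gfunction (val : List (List String)) (n : Int) : Prop :=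
  4 ≤ val.length ∧
  (∀ row ∈ val.take 4, row.getD 0 "" ∈ pvHexL ∧ row.getD 1 "" ∈ pvHexL ∧ 2 ≤ row.length) ∧
  -9 ≤ n ∧ n ≤ 10
instance (val : List (List String)) (n : Int) : Decidable (Pre_gfunction val n) := by
  unfold Pre_gfunction; infer_instance

def pvWitness_gfunction : List (List String) × Int :=
  ([["1","D"], ["2","C"], ["3","A"], ["A","F"]], 1)

def Spec_gfunction (val : List (List String)) (n : Int) (out : List (List String)) : Prop := out = gfunction_alt val n
instance (val : List (List String)) (n : Int) (out : List (List String)) : Decidable (Spec_gfunction val n out) := by unfold Spec_gfunction; infer_instance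

-- ===== CLAIM (what is proved, stated in full; the proofs are below) =====
def Claim_equal_gfunction : Prop := ∀ (val : List (List String)) (n : Int), Dom_gfunction val n → Pre_gfunction val n → Spec_gfunction val n (gfunction val n)

-- ===== LEMMAS AND PROOFS =====

-- proof-side helpers: the 4-bit patterns hexx assigns to '0'..'F', and the shape of one
-- bit-XOR / one 4-bit half of A's step c
def pvBitsTbl : List (List Char) := [['0','0','0','0'],['0','0','0','1'],['0','0','1','0'],['0','0','1','1'],['0','1','0','0'],['0','1','0','1'],['0','1','1','0'],['0','1','1','1'],['1','0','0','0'],['1','0','0','1'],['1','0','1','0'],['1','0','1','1'],['1','1','0','0'],['1','1','0','1'],['1','1','1','0'],['1','1','1','1']]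

-- the S-box substitution step agrees byte-wise: A's char pair is B's byte, formatted
set_option maxRecDepth 100000 in
theorem pvL1 : ∀ h ∈ pvHexL, ∀ l ∈ pvHexL, pvASub h l = pvBFmt (pvBByte h l) := by decide

-- each B S-box byte is in [0, 256)
set_option maxRecDepth 100000 in
theorem pvL4 : ∀ h ∈ pvHexL, ∀ l ∈ pvHexL,
    (pvBByte h l).toNat ∈ List.range 256 ∧ (((pvBByte h l).toNat : Int) = pvBByte h l) := by decide

-- pvBFmt on a byte, written via the byte's two nibbles
set_option maxRecDepth 100000 in
theorem pvBFmt256 : ∀ j ∈ List.range 256, pvBFmt (j : Int) =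
    [String.ofList [pvHexChars.getD (j / 16) ' '], String.ofList [pvHexChars.getD (j % 16) ' ']] := by
  decide

-- hexx maps the m-th hex character to the m-th 4-bit pattern
theorem pvH : ∀ m ∈ List.range 16,
    pvHexx.get? (String.ofList [pvHexChars.getD m ' ']).toList = some (pvBitsTbl.getD m []) := by
  decide

theorem pvBitsLen : ∀ m ∈ List.range 16, (pvBitsTbl.getD m []).length = 4 := by decide

-- indexing temp2 = hp ++ hq (hp of length 4) at 0..7 picks bits of hp resp. hq
theorem pvApp (hp hq : List Char) (h : hp.length = 4) (h2 : hq.length = 4) :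
    (((PySem.List.pyGet? (hp ++ hq) (0 : Int)).map (fun c => [c])).getD [] = [hp.getD 0 ' ']) ∧
    (((PySem.List.pyGet? (hp ++ hq) (1 : Int)).map (fun c => [c])).getD [] = [hp.getD 1 ' ']) ∧
    (((PySem.List.pyGet? (hp ++ hq) (2 : Int)).map (fun c => [c])).getD [] = [hp.getD 2 ' ']) ∧
    (((PySem.List.pyGet? (hp ++ hq) (3 : Int)).map (fun c => [c])).getD [] = [hp.getD 3 ' ']) ∧
    (((PySem.List.pyGet? (hp ++ hq) (4 : Int)).map (fun c => [c])).getD [] = [hq.getD 0 ' ']) ∧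
    (((PySem.List.pyGet? (hp ++ hq) (5 : Int)).map (fun c => [c])).getD [] = [hq.getD 1 ' ']) ∧
    (((PySem.List.pyGet? (hp ++ hq) (6 : Int)).map (fun c => [c])).getD [] = [hq.getD 2 ' ']) ∧
    (((PySem.List.pyGet? (hp ++ hq) (7 : Int)).map (fun c => [c])).getD [] = [hq.getD 3 ' ']) := by
  match hp, hq, h, h2 with
  | [a, b, c, d], [e, f, g, i], _, _ =>
    exact ⟨rfl, rfl, rfl, rfl, rfl, rfl, rfl, rfl⟩

-- pvAXor on a two-character word, unfolded (pure definitional expansion)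
theorem pvAXorExpand (p q : String) (row : List String) :
    pvAXor [p, q] row =
      [String.ofList (pvBin2hex [
        PySem.Int.toChars (PySem.Int.bxor ((PySem.Int.ofChars? ((PySem.List.pyGet? row (0 : Int)).getD "").toList).getD 0) ((PySem.Int.ofChars? (((PySem.List.pyGet? ((pvHexx.get? p.toList).getD [] ++ (pvHexx.get? q.toList).getD []) (0 : Int)).map (fun c => [c])).getD [])).getD 0)),
        PySem.Int.toChars (PySem.Int.bxor ((PySem.Int.ofChars? ((PySem.List.pyGet? row (1 : Int)).getD "").toList).getD 0) ((PySem.Int.ofChars? (((PySem.List.pyGet? ((pvHexx.get? p.toList).getD [] ++ (pvHexx.get? q.toList).getD []) (1 : Int)).map (fun c => [c])).getD [])).getD 0)),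
        PySem.Int.toChars (PySem.Int.bxor ((PySem.Int.ofChars? ((PySem.List.pyGet? row (2 : Int)).getD "").toList).getD 0) ((PySem.Int.ofChars? (((PySem.List.pyGet? ((pvHexx.get? p.toList).getD [] ++ (pvHexx.get? q.toList).getD []) (2 : Int)).map (fun c => [c])).getD [])).getD 0)),
        PySem.Int.toChars (PySem.Int.bxor ((PySem.Int.ofChars? ((PySem.List.pyGet? row (3 : Int)).getD "").toList).getD 0) ((PySem.Int.ofChars? (((PySem.List.pyGet? ((pvHexx.get? p.toList).getD [] ++ (pvHexx.get? q.toList).getD []) (3 : Int)).map (fun c => [c])).getD [])).getD 0))]),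
       String.ofList (pvBin2hex [
        PySem.Int.toChars (PySem.Int.bxor ((PySem.Int.ofChars? ((PySem.List.pyGet? row (4 : Int)).getD "").toList).getD 0) ((PySem.Int.ofChars? (((PySem.List.pyGet? ((pvHexx.get? p.toList).getD [] ++ (pvHexx.get? q.toList).getD []) (4 : Int)).map (fun c => [c])).getD [])).getD 0)),
        PySem.Int.toChars (PySem.Int.bxor ((PySem.Int.ofChars? ((PySem.List.pyGet? row (5 : Int)).getD "").toList).getD 0) ((PySem.Int.ofChars? (((PySem.List.pyGet? ((pvHexx.get? p.toList).getD [] ++ (pvHexx.get? q.toList).getD []) (5 : Int)).map (fun c => [c])).getD [])).getD 0)),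
        PySem.Int.toChars (PySem.Int.bxor ((PySem.Int.ofChars? ((PySem.List.pyGet? row (6 : Int)).getD "").toList).getD 0) ((PySem.Int.ofChars? (((PySem.List.pyGet? ((pvHexx.get? p.toList).getD [] ++ (pvHexx.get? q.toList).getD []) (6 : Int)).map (fun c => [c])).getD [])).getD 0)),
        PySem.Int.toChars (PySem.Int.bxor ((PySem.Int.ofChars? ((PySem.List.pyGet? row (7 : Int)).getD "").toList).getD 0) ((PySem.Int.ofChars? (((PySem.List.pyGet? ((pvHexx.get? p.toList).getD [] ++ (pvHexx.get? q.toList).getD []) (7 : Int)).map (fun c => [c])).getD [])).getD 0))])] := by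
  rfl

-- one 4-bit half of A's step c equals the nibble-wise integer XOR, as a hex character
set_option maxRecDepth 100000 in
set_option maxHeartbeats 1000000 in
theorem pvN1 : ∀ k ∈ List.range 10, ∀ m ∈ List.range 16,
    pvBin2hex [PySem.Int.toChars (PySem.Int.bxor ((PySem.Int.ofChars? ((PySem.List.pyGet? (pvRcon.getD k []) (0 : Int)).getD "").toList).getD 0) ((PySem.Int.ofChars? [(pvBitsTbl.getD m []).getD 0 ' ']).getD 0)),
        PySem.Int.toChars (PySem.Int.bxor ((PySem.Int.ofChars? ((PySem.List.pyGet? (pvRcon.getD k []) (1 : Int)).getD "").toList).getD 0) ((PySem.Int.ofChars? [(pvBitsTbl.getD m []).getD 1 ' ']).getD 0)),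
        PySem.Int.toChars (PySem.Int.bxor ((PySem.Int.ofChars? ((PySem.List.pyGet? (pvRcon.getD k []) (2 : Int)).getD "").toList).getD 0) ((PySem.Int.ofChars? [(pvBitsTbl.getD m []).getD 2 ' ']).getD 0)),
        PySem.Int.toChars (PySem.Int.bxor ((PySem.Int.ofChars? ((PySem.List.pyGet? (pvRcon.getD k []) (3 : Int)).getD "").toList).getD 0) ((PySem.Int.ofChars? [(pvBitsTbl.getD m []).getD 3 ' ']).getD 0))] =
      [pvHexChars.getD (Nat.xor m ((pvRconB.getD k 0).toNat / 16)) ' '] := by decide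

set_option maxRecDepth 100000 in
set_option maxHeartbeats 1000000 in
theorem pvN2 : ∀ k ∈ List.range 10, ∀ m ∈ List.range 16,
    pvBin2hex [PySem.Int.toChars (PySem.Int.bxor ((PySem.Int.ofChars? ((PySem.List.pyGet? (pvRcon.getD k []) (4 : Int)).getD "").toList).getD 0) ((PySem.Int.ofChars? [(pvBitsTbl.getD m []).getD 0 ' ']).getD 0)),
        PySem.Int.toChars (PySem.Int.bxor ((PySem.Int.ofChars? ((PySem.List.pyGet? (pvRcon.getD k []) (5 : Int)).getD "").toList).getD 0) ((PySem.Int.ofChars? [(pvBitsTbl.getD m []).getD 1 ' ']).getD 0)),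
        PySem.Int.toChars (PySem.Int.bxor ((PySem.Int.ofChars? ((PySem.List.pyGet? (pvRcon.getD k []) (6 : Int)).getD "").toList).getD 0) ((PySem.Int.ofChars? [(pvBitsTbl.getD m []).getD 2 ' ']).getD 0)),
        PySem.Int.toChars (PySem.Int.bxor ((PySem.Int.ofChars? ((PySem.List.pyGet? (pvRcon.getD k []) (7 : Int)).getD "").toList).getD 0) ((PySem.Int.ofChars? [(pvBitsTbl.getD m []).getD 3 ' ']).getD 0))] =
      [pvHexChars.getD (Nat.xor m ((pvRconB.getD k 0).toNat % 16)) ' '] := by decide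

-- B's integer XOR, split into the two nibble XORs
set_option maxRecDepth 1000000 in
set_option maxHeartbeats 4000000 in
theorem pvArith : ∀ j ∈ List.range 256, ∀ k ∈ List.range 10,
    pvBFmt (PySem.Int.bxor (j : Int) (pvRconB.getD k 0)) =
      [String.ofList [pvHexChars.getD (Nat.xor (j / 16) ((pvRconB.getD k 0).toNat / 16)) ' '],
       String.ofList [pvHexChars.getD (Nat.xor (j % 16) ((pvRconB.getD k 0).toNat % 16)) ' ']] := by
  decide

-- Python's rcon[n-1] (negative indices wrap) picks the same position in both tables
theorem pvRconIdx (n : Int) (h1 : -9 ≤ n) (h2 : n ≤ 10) : ∃ k ∈ List.range 10,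
    (PySem.List.pyGet? pvRcon (n - 1)).getD [] = pvRcon.getD k [] ∧
    (PySem.List.pyGet? pvRconB (n - 1)).getD 0 = pvRconB.getD k 0 := by
  refine ⟨(PySem.Int.mod (n - 1) 10).toNat, ?_, ?_, ?_⟩ <;> interval_cases n <;> decide

theorem pvExists4 {α : Type} (l : List α) (h : 4 ≤ l.length) :
    ∃ a b c d t, l = a :: b :: c :: d :: t := by
  match l with
  | a :: b :: c :: d :: t => exact ⟨a, b, c, d, t, rfl⟩

theorem pvRow2 (row : List String) (h : 2 ≤ row.length) :
    ∃ a b t, row = a :: b :: t := by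
  match row with
  | a :: b :: t => exact ⟨a, b, t, rfl⟩


-- literal-index access lemmas (symbolic tails keep these from reducing by kernel whnf alone)
theorem pvPy4 {α : Type} (x0 x1 x2 x3 : α) (xs : List α) :
    PySem.List.pyGet? (x0::x1::x2::x3::xs) ((0:Nat):Int) = some x0 ∧
    PySem.List.pyGet? (x0::x1::x2::x3::xs) ((1:Nat):Int) = some x1 ∧
    PySem.List.pyGet? (x0::x1::x2::x3::xs) ((2:Nat):Int) = some x2 ∧
    PySem.List.pyGet? (x0::x1::x2::x3::xs) ((3:Nat):Int) = some x3 := by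
  refine ⟨?_, ?_, ?_, ?_⟩ <;> rw [PySem.List.pyGet?_natCast] <;> rfl

theorem pvRow01 (a b : String) (t : List String) :
    (PySem.List.pyGet? (a::b::t) (0:Int) = some a) ∧
    (PySem.List.pyGet? (a::b::t) (1:Int) = some b) := by
  constructor
  · rw [show (0:Int) = ((0:Nat):Int) from rfl, PySem.List.pyGet?_natCast]; rfl
  · rw [show (1:Int) = ((1:Nat):Int) from rfl, PySem.List.pyGet?_natCast]; rfl

theorem pvSet4 {α : Type} (w x y z v : α) :
    PySem.List.pySetD [w, x, y, z] 0 v = [v, x, y, z] := rfl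

theorem pvGetD4 {α : Type} (w x y z d : α) :
    PySem.List.pyGetD [w, x, y, z] 0 d = w := rfl

-- ===== VERDICT (by name: the statement is the Claim_ definition above) =====
set_option maxRecDepth 100000
set_option maxHeartbeats 4000000
theorem gfunction_spec : Claim_equal_gfunction := by
  intro val n _ hpre
  obtain ⟨hlen, hrows, hn1, hn2⟩ := hpre
  obtain ⟨r0, r1, r2, r3, rest, rfl⟩ := pvExists4 val hlen
  have h0 := hrows r0 (by simp)
  have h1 := hrows r1 (by simp)
  have h2 := hrows r2 (by simp)
  have h3 := hrows r3 (by simp)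
  obtain ⟨a0, b0, t0, rfl⟩ := pvRow2 r0 h0.2.2
  obtain ⟨a1, b1, t1, rfl⟩ := pvRow2 r1 h1.2.2
  obtain ⟨a2, b2, t2, rfl⟩ := pvRow2 r2 h2.2.2
  obtain ⟨a3, b3, t3, rfl⟩ := pvRow2 r3 h3.2.2
  simp only [List.getD_cons_zero, List.getD_cons_succ] at h0 h1 h2 h3
  obtain ⟨k, hk, hrA, hrB⟩ := pvRconIdx n hn1 hn2
  -- both ports, after rotating the word and unrolling the 4-step loop (definitional)
  show PySem.List.pySetD
      [pvASub ((PySem.List.pyGet? ((PySem.List.pyGet? ((a1::b1::t1)::(a2::b2::t2)::(a3::b3::t3)::(a0::b0::t0)::rest) ((0:Nat):Int)).getD []) 0).getD "") ((PySem.List.pyGet? ((PySem.List.pyGet? ((a1::b1::t1)::(a2::b2::t2)::(a3::b3::t3)::(a0::b0::t0)::rest) ((0:Nat):Int)).getD []) 1).getD ""),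
        pvASub ((PySem.List.pyGet? ((PySem.List.pyGet? ((a1::b1::t1)::(a2::b2::t2)::(a3::b3::t3)::(a0::b0::t0)::rest) ((1:Nat):Int)).getD []) 0).getD "") ((PySem.List.pyGet? ((PySem.List.pyGet? ((a1::b1::t1)::(a2::b2::t2)::(a3::b3::t3)::(a0::b0::t0)::rest) ((1:Nat):Int)).getD []) 1).getD ""),
        pvASub ((PySem.List.pyGet? ((PySem.List.pyGet? ((a1::b1::t1)::(a2::b2::t2)::(a3::b3::t3)::(a0::b0::t0)::rest) ((2:Nat):Int)).getD []) 0).getD "") ((PySem.List.pyGet? ((PySem.List.pyGet? ((a1::b1::t1)::(a2::b2::t2)::(a3::b3::t3)::(a0::b0::t0)::rest) ((2:Nat):Int)).getD []) 1).getD ""),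
        pvASub ((PySem.List.pyGet? ((PySem.List.pyGet? ((a1::b1::t1)::(a2::b2::t2)::(a3::b3::t3)::(a0::b0::t0)::rest) ((3:Nat):Int)).getD []) 0).getD "") ((PySem.List.pyGet? ((PySem.List.pyGet? ((a1::b1::t1)::(a2::b2::t2)::(a3::b3::t3)::(a0::b0::t0)::rest) ((3:Nat):Int)).getD []) 1).getD "")] 0
      (pvAXor (PySem.List.pyGetD
      [pvASub ((PySem.List.pyGet? ((PySem.List.pyGet? ((a1::b1::t1)::(a2::b2::t2)::(a3::b3::t3)::(a0::b0::t0)::rest) ((0:Nat):Int)).getD []) 0).getD "") ((PySem.List.pyGet? ((PySem.List.pyGet? ((a1::b1::t1)::(a2::b2::t2)::(a3::b3::t3)::(a0::b0::t0)::rest) ((0:Nat):Int)).getD []) 1).getD ""),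
        pvASub ((PySem.List.pyGet? ((PySem.List.pyGet? ((a1::b1::t1)::(a2::b2::t2)::(a3::b3::t3)::(a0::b0::t0)::rest) ((1:Nat):Int)).getD []) 0).getD "") ((PySem.List.pyGet? ((PySem.List.pyGet? ((a1::b1::t1)::(a2::b2::t2)::(a3::b3::t3)::(a0::b0::t0)::rest) ((1:Nat):Int)).getD []) 1).getD ""),
        pvASub ((PySem.List.pyGet? ((PySem.List.pyGet? ((a1::b1::t1)::(a2::b2::t2)::(a3::b3::t3)::(a0::b0::t0)::rest) ((2:Nat):Int)).getD []) 0).getD "") ((PySem.List.pyGet? ((PySem.List.pyGet? ((a1::b1::t1)::(a2::b2::t2)::(a3::b3::t3)::(a0::b0::t0)::rest) ((2:Nat):Int)).getD []) 1).getD ""),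
        pvASub ((PySem.List.pyGet? ((PySem.List.pyGet? ((a1::b1::t1)::(a2::b2::t2)::(a3::b3::t3)::(a0::b0::t0)::rest) ((3:Nat):Int)).getD []) 0).getD "") ((PySem.List.pyGet? ((PySem.List.pyGet? ((a1::b1::t1)::(a2::b2::t2)::(a3::b3::t3)::(a0::b0::t0)::rest) ((3:Nat):Int)).getD []) 1).getD "")] 0 [])
        ((PySem.List.pyGet? pvRcon (n - 1)).getD [])) =
    (PySem.List.pySetD
      [pvBByte ((PySem.List.pyGet? ((PySem.List.pyGet? ((a1::b1::t1)::(a2::b2::t2)::(a3::b3::t3)::(a0::b0::t0)::rest) ((0:Nat):Int)).getD []) 0).getD "") ((PySem.List.pyGet? ((PySem.List.pyGet? ((a1::b1::t1)::(a2::b2::t2)::(a3::b3::t3)::(a0::b0::t0)::rest) ((0:Nat):Int)).getD []) 1).getD ""),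
        pvBByte ((PySem.List.pyGet? ((PySem.List.pyGet? ((a1::b1::t1)::(a2::b2::t2)::(a3::b3::t3)::(a0::b0::t0)::rest) ((1:Nat):Int)).getD []) 0).getD "") ((PySem.List.pyGet? ((PySem.List.pyGet? ((a1::b1::t1)::(a2::b2::t2)::(a3::b3::t3)::(a0::b0::t0)::rest) ((1:Nat):Int)).getD []) 1).getD ""),
        pvBByte ((PySem.List.pyGet? ((PySem.List.pyGet? ((a1::b1::t1)::(a2::b2::t2)::(a3::b3::t3)::(a0::b0::t0)::rest) ((2:Nat):Int)).getD []) 0).getD "") ((PySem.List.pyGet? ((PySem.List.pyGet? ((a1::b1::t1)::(a2::b2::t2)::(a3::b3::t3)::(a0::b0::t0)::rest) ((2:Nat):Int)).getD []) 1).getD ""),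
        pvBByte ((PySem.List.pyGet? ((PySem.List.pyGet? ((a1::b1::t1)::(a2::b2::t2)::(a3::b3::t3)::(a0::b0::t0)::rest) ((3:Nat):Int)).getD []) 0).getD "") ((PySem.List.pyGet? ((PySem.List.pyGet? ((a1::b1::t1)::(a2::b2::t2)::(a3::b3::t3)::(a0::b0::t0)::rest) ((3:Nat):Int)).getD []) 1).getD "")] 0
      (PySem.Int.bxor (PySem.List.pyGetD
      [pvBByte ((PySem.List.pyGet? ((PySem.List.pyGet? ((a1::b1::t1)::(a2::b2::t2)::(a3::b3::t3)::(a0::b0::t0)::rest) ((0:Nat):Int)).getD []) 0).getD "") ((PySem.List.pyGet? ((PySem.List.pyGet? ((a1::b1::t1)::(a2::b2::t2)::(a3::b3::t3)::(a0::b0::t0)::rest) ((0:Nat):Int)).getD []) 1).getD ""),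
        pvBByte ((PySem.List.pyGet? ((PySem.List.pyGet? ((a1::b1::t1)::(a2::b2::t2)::(a3::b3::t3)::(a0::b0::t0)::rest) ((1:Nat):Int)).getD []) 0).getD "") ((PySem.List.pyGet? ((PySem.List.pyGet? ((a1::b1::t1)::(a2::b2::t2)::(a3::b3::t3)::(a0::b0::t0)::rest) ((1:Nat):Int)).getD []) 1).getD ""),
        pvBByte ((PySem.List.pyGet? ((PySem.List.pyGet? ((a1::b1::t1)::(a2::b2::t2)::(a3::b3::t3)::(a0::b0::t0)::rest) ((2:Nat):Int)).getD []) 0).getD "") ((PySem.List.pyGet? ((PySem.List.pyGet? ((a1::b1::t1)::(a2::b2::t2)::(a3::b3::t3)::(a0::b0::t0)::rest) ((2:Nat):Int)).getD []) 1).getD ""),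
        pvBByte ((PySem.List.pyGet? ((PySem.List.pyGet? ((a1::b1::t1)::(a2::b2::t2)::(a3::b3::t3)::(a0::b0::t0)::rest) ((3:Nat):Int)).getD []) 0).getD "") ((PySem.List.pyGet? ((PySem.List.pyGet? ((a1::b1::t1)::(a2::b2::t2)::(a3::b3::t3)::(a0::b0::t0)::rest) ((3:Nat):Int)).getD []) 1).getD "")] 0 0)
        ((PySem.List.pyGet? pvRconB (n - 1)).getD 0))).map pvBFmt
  rw [(pvPy4 _ _ _ _ rest).1, (pvPy4 _ _ _ _ rest).2.1, (pvPy4 _ _ _ _ rest).2.2.1,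
      (pvPy4 _ _ _ _ rest).2.2.2]
  simp only [Option.getD_some, (pvRow01 a0 b0 t0).1, (pvRow01 a0 b0 t0).2,
    (pvRow01 a1 b1 t1).1, (pvRow01 a1 b1 t1).2, (pvRow01 a2 b2 t2).1, (pvRow01 a2 b2 t2).2,
    (pvRow01 a3 b3 t3).1, (pvRow01 a3 b3 t3).2]
  rw [pvGetD4, pvGetD4, pvSet4, pvSet4, List.map_cons, List.map_cons, List.map_cons,
      List.map_cons, List.map_nil, hrA, hrB]
  rw [pvL1 a1 h1.1 b1 h1.2.1, pvL1 a2 h2.1 b2 h2.2.1, pvL1 a3 h3.1 b3 h3.2.1,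
      pvL1 a0 h0.1 b0 h0.2.1]
  have hj4 := pvL4 a1 h1.1 b1 h1.2.1
  rw [← hj4.2]
  have hj : (pvBByte a1 b1).toNat < 256 := List.mem_range.mp hj4.1
  have hjh : (pvBByte a1 b1).toNat / 16 ∈ List.range 16 := List.mem_range.mpr (by omega)
  have hjl : (pvBByte a1 b1).toNat % 16 ∈ List.range 16 := List.mem_range.mpr (by omega)
  rw [pvBFmt256 _ hj4.1, pvAXorExpand, pvH _ hjh, pvH _ hjl]
  simp only [Option.getD_some]
  have happ := pvApp (pvBitsTbl.getD ((pvBByte a1 b1).toNat / 16) [])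
                     (pvBitsTbl.getD ((pvBByte a1 b1).toNat % 16) [])
                     (pvBitsLen _ hjh) (pvBitsLen _ hjl)
  rw [happ.1, happ.2.1, happ.2.2.1, happ.2.2.2.1, happ.2.2.2.2.1, happ.2.2.2.2.2.1,
      happ.2.2.2.2.2.2.1, happ.2.2.2.2.2.2.2]
  rw [pvN1 k hk _ hjh, pvN2 k hk _ hjl, pvArith _ hj4.1 k hk]
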